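-- pv_equiv track=rewrite | github.com/maryemtarek/Blast | Blast-Branch/HSP.py | hit
-- ===== SOURCE A (Python) =====
-- def hit(seeds,gene):
--     hitList=[]
--     for i in range(0, len(seeds)):
--         myWord = seeds[i][0]
--         for j in range(0, len(gene)):
--             if gene[j:j+3]==myWord:
--                 hitList.append([i, j]) #i index in seeds list, j start hit in Gene
--     return  hitList
-- ===== SOURCE B (Python) =====
-- def hit(seeds, gene):
--     index = {}
--     for j in range(len(gene)):
--         index.setdefault(gene[j:j+3], []).append(j)
--     hitList = []
--     for i in range(len(seeds)):
--         for j in index.get(seeds[i][0], []):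
--             hitList.append([i, j])
--     return hitList
-- ===== Notes on version B (the rewrite author's own statement) =====
-- stated objective: faster
-- what changed: B builds a dictionary from each 3-char window of gene to its sorted positions in one pass, then answers each seed by a single lookup, instead of A's rescanning the whole gene for every seed.
import Mathlib
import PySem

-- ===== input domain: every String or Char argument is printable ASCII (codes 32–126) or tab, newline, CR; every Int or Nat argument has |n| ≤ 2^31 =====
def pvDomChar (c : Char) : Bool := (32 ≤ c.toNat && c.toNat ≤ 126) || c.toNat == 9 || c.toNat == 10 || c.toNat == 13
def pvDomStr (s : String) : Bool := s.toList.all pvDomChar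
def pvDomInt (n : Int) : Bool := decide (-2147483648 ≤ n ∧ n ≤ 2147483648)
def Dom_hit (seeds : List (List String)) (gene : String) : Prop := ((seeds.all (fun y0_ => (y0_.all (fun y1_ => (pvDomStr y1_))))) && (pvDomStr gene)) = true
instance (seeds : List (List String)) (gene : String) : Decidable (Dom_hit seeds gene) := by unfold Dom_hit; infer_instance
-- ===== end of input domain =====

-- B replaces A's per-seed rescan of the whole gene by a dictionary from each 3-char window to its positions, built once (objective: faster, asymptotic).

-- ===== PORT A =====
def hit (seeds : List (List String)) (gene : String) : List (List Int) :=
  (PySem.List.pyRange 0 (seeds.length : Int) 1).foldl (fun hitList i =>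
    let myWord := PySem.List.pyGetD (PySem.List.pyGetD seeds i []) 0 ""
    (PySem.List.pyRange 0 (PySem.Str.len gene) 1).foldl (fun acc j =>
      if PySem.Str.slice gene (some j) (some (j + 3)) == myWord then acc ++ [[i, j]] else acc)
      hitList) []

-- ===== PORT B =====
def hit_alt (seeds : List (List String)) (gene : String) : List (List Int) :=
  -- index.setdefault(gene[j:j+3], []).append(j)  ==  modify key [] (· ++ [j])
  let index : PySem.Dict String (List Int) :=
    (PySem.List.pyRange 0 (PySem.Str.len gene) 1).foldl
      (fun d j => d.modify (PySem.Str.slice gene (some j) (some (j + 3))) [] (· ++ [j]))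
      PySem.Dict.empty
  (PySem.List.pyRange 0 (seeds.length : Int) 1).foldl (fun hitList i =>
    (index.getD (PySem.List.pyGetD (PySem.List.pyGetD seeds i []) 0 "") []).foldl
      (fun acc j => acc ++ [[i, j]]) hitList) []

-- ===== PRECONDITION & SPEC =====
-- Pre_ excludes seeds containing an empty inner list, on which Python A raises IndexError at seeds[i][0].
def Pre_hit (seeds : List (List String)) (gene : String) : Prop := ∀ s ∈ seeds, s ≠ []
instance (seeds : List (List String)) (gene : String) : Decidable (Pre_hit seeds gene) := by unfold Pre_hit; infer_instance
def pvWitness_hit : List (List String) × String := ([["GAT"], ["TAC"]], "GATTACA")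
def Spec_hit (seeds : List (List String)) (gene : String) (out : List (List Int)) : Prop := out = hit_alt seeds gene
instance (seeds : List (List String)) (gene : String) (out : List (List Int)) : Decidable (Spec_hit seeds gene out) := by unfold Spec_hit; infer_instance

-- ===== CLAIM (what is proved, stated in full; the proofs are below) =====
def Claim_equal_hit : Prop := ∀ (seeds : List (List String)) (gene : String), Dom_hit seeds gene → Pre_hit seeds gene → Spec_hit seeds gene (hit seeds gene)

-- ===== LEMMAS AND PROOFS =====

-- the grouping loop: looking up w in the built index yields exactly the matching positions, in order
theorem groupFold_getD (L : List Int) (f : Int → String) (d : PySem.Dict String (List Int)) (w : String) :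
    (L.foldl (fun d j => d.modify (f j) [] (· ++ [j])) d).getD w []
      = d.getD w [] ++ L.filter (fun j => f j == w) := by
  induction L generalizing d with
  | nil => simp
  | cons j L ih =>
    simp only [List.foldl_cons, List.filter_cons, ih]
    rw [PySem.Dict.getD_modify]
    by_cases h : w = f j
    · simp [h]
    · have hb : (f j == w) = false := by
        simp only [beq_eq_false_iff_ne]; exact fun hc => h hc.symm
      simp [h, hb]

theorem hit_spec : Claim_equal_hit := by
  intro seeds gene _ _
  unfold Spec_hit hit hit_alt
  apply PySem.List.foldl_congr_mem
  intro acc i _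
  rw [PySem.List.foldl_append_if, groupFold_getD, PySem.Dict.getD_empty,
      List.nil_append, PySem.List.foldl_append_singleton_eq_map]
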